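-- pv_equiv track=rewrite | github.com/kookoowaa/Repository | Python/BigData_Programming/170802(감성분석)/감성분석.py | weight_default
-- ===== SOURCE A (Python) =====
-- def weight_default(list_words, dic_weights):
--     '''Set default weights of words
--
--     list_words..: a list of words to be analyzed from "parse_input()"
--     dic_weights.: a dictionary of words and their defaults weights
--                   processed by "parse_weidht() using
--                   EmotionLookupTable.txt
--     '''
--     l = []
--     for word in list_words:
--         if word in dic_weights:
--             l.append((word, dic_weights[word]))
--         else:
--             substr = word
--             while substr != '':
--                 pat = substr + '*'
--                 if pat in dic_weights:
--                     l.append((word, dic_weights[pat]))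
--                     break
--                 else:
--                     substr = substr[:-1]
--             if substr == '':
--                 l.append((word, 0))
--
--     return l
-- ===== SOURCE B (Python) =====
-- def weight_default(list_words, dic_weights):
--     # Precompute a stem->weight index of the wildcard keys once, then for each
--     # word take the weight of the longest matching stem by a single ascending
--     # scan over its prefixes (last match wins).
--     stems = {k[:-1]: v for k, v in dic_weights.items() if k.endswith('*')}
--     out = []
--     for word in list_words:
--         if word in dic_weights:
--             out.append((word, dic_weights[word]))
--         else:
--             w = 0
--             for i in range(1, len(word) + 1):
--                 v = stems.get(word[:i])
--                 if v is not None: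
--                     w = v
--             out.append((word, w))
--     return out
-- ===== Notes on version B (the rewrite author's own statement) =====
-- stated objective: alternative
-- what changed: B precomputes a stem-to-weight index of the wildcard keys once and, per word, replaces A's descending shrink-and-concatenate loop with a break by a single ascending scan over the word's prefixes that keeps the last (= longest) matching stem's weight.
import Mathlib
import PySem

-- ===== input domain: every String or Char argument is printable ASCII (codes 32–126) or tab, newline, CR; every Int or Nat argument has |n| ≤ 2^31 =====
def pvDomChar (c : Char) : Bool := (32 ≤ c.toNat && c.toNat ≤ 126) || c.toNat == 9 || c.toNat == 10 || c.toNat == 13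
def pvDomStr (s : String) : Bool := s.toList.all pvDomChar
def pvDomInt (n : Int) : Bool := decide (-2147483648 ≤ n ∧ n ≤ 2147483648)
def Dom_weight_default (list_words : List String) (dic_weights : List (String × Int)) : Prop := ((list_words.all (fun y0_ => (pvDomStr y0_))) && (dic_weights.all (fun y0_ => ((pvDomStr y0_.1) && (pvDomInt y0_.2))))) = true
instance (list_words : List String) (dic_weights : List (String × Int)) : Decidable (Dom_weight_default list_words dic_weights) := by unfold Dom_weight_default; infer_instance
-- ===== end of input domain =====

-- B replaces A's per-word shrink-and-concatenate wildcard search by a stem index built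
-- once plus an ascending last-match prefix scan per word (objective: alternative).

-- ===== PORT A =====
-- the inner `while substr != '':` loop of A: try substr + '*' in the dict, else substr = substr[:-1];
-- returns the weight found, or 0 when substr reached '' (the `if substr == ''` default append).
def wdWhile (d : PySem.Dict String Int) (substr : List Char) : Int :=
  if h : substr = [] then 0
  else
    match d.get? (String.ofList (substr ++ ['*'])) with   -- pat = substr + '*'; `pat in dic_weights` / `dic_weights[pat]`
    | some v => v
    | none => wdWhile d substr.dropLast                    -- substr = substr[:-1]
termination_by substr.length
decreasing_by simp only [List.length_dropLast]; exact Nat.sub_lt (List.length_pos_iff.mpr h) one_pos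

def weight_default (list_words : List String) (dic_weights : List (String × Int)) : List (String × Int) :=
  let d := PySem.Dict.ofList dic_weights
  list_words.foldl
    (fun l word =>
      match d.get? word with                               -- `word in dic_weights` / `dic_weights[word]`
      | some v => l ++ [(word, v)]
      | none => l ++ [(word, wdWhile d word.toList)])
    []

-- ===== PORT B =====
-- stems = {k[:-1]: v for k, v in dic_weights.items() if k.endswith('*')}
-- (k[:-1] is dropLast on the character list, cf. PySem.Str.slice_to_neg_one)
def wdStems (d : PySem.Dict String Int) : PySem.Dict (List Char) Int :=
  d.items.foldl
    (fun st kv =>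
      if PySem.Str.endswith kv.1 "*" then st.insert kv.1.toList.dropLast kv.2 else st)
    PySem.Dict.empty

-- the per-word ascending scan: for i in range(1, len(word)+1): v = stems.get(word[:i]); if v is not None: w = v
def wdScan (st : PySem.Dict (List Char) Int) (cs : List Char) : Int :=
  (PySem.List.pyRange 1 ((cs.length : Int) + 1)).foldl
    (fun w i =>
      match st.get? (cs.take i.toNat) with                 -- word[:i], 1 ≤ i
      | some v => v
      | none => w)
    0

def weight_default_alt (list_words : List String) (dic_weights : List (String × Int)) : List (String × Int) :=
  let d := PySem.Dict.ofList dic_weights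
  let st := wdStems d
  list_words.foldl
    (fun out word =>
      match d.get? word with
      | some v => out ++ [(word, v)]
      | none => out ++ [(word, wdScan st word.toList)])
    []

-- ===== PRECONDITION & SPEC =====
def Spec_weight_default (list_words : List String) (dic_weights : List (String × Int)) (out : List (String × Int)) : Prop := out = weight_default_alt list_words dic_weights
instance (list_words : List String) (dic_weights : List (String × Int)) (out : List (String × Int)) : Decidable (Spec_weight_default list_words dic_weights out) := by unfold Spec_weight_default; infer_instance

-- ===== CLAIM (what is proved, stated in full; the proofs are below) =====
def Claim_equal_weight_default : Prop := ∀ (list_words : List String) (dic_weights : List (String × Int)), Dom_weight_default list_words dic_weights → Spec_weight_default list_words dic_weights (weight_default list_words dic_weights)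

-- ===== LEMMAS AND PROOFS =====

-- a key ending in '*' is its stem plus '*'
lemma toList_eq_of_endswith_star (k : String) (h : PySem.Str.endswith k "*" = true) :
    k.toList = k.toList.dropLast ++ ['*'] := by
  rw [PySem.Str.endswith_eq] at h
  rcases (PySem.Chars.endswith_iff _ _).mp h with ⟨t, ht⟩
  have : k.toList.dropLast = t := by
    have := congrArg List.dropLast ht.symm
    simpa using this
  rw [this]; exact ht.symm

-- the stem index looks up exactly what A's wildcard pattern lookup finds
lemma wdStems_get? (d : PySem.Dict String Int) (hnd : d.keys.Nodup) (s : List Char) :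
    (wdStems d).get? s = d.get? (String.ofList (s ++ ['*'])) := by
  set l := d.items.filter (fun kv => PySem.Str.endswith kv.1 "*") with hl
  have hfold : wdStems d
      = l.foldl (fun st kv => st.insert kv.1.toList.dropLast kv.2) PySem.Dict.empty := by
    simp only [wdStems, hl, PySem.List.foldl_if_eq_foldl_filter]
  -- keys of the filtered items are distinct even after dropping the trailing '*'
  have hstar : ∀ kv ∈ l, kv.1.toList = kv.1.toList.dropLast ++ ['*'] := by
    intro kv hkv
    exact toList_eq_of_endswith_star _ (by simpa using (List.of_mem_filter hkv))
  have hfstnd : (l.map (fun kv => kv.1)).Nodup := by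
    have : l.Sublist d.items := List.filter_sublist
    exact (hnd.sublist (this.map _))
  have hmapnd : (l.map (fun kv => kv.1.toList.dropLast)).Nodup := by
    have h1 : l.map (fun kv => kv.1.toList.dropLast)
        = (l.map (fun kv => kv.1)).map (fun k => k.toList.dropLast) := by
      simp [List.map_map, Function.comp]
    rw [h1]
    refine List.Nodup.map_on ?_ hfstnd
    intro x hx y hy hxy
    rcases List.mem_map.mp hx with ⟨a, ha, rfl⟩
    rcases List.mem_map.mp hy with ⟨b, hb, rfl⟩
    have : a.1.toList = b.1.toList := by
      rw [hstar a ha, hstar b hb, hxy]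
    exact String.toList_injective this
  have hitems : (wdStems d).items = l.map (fun kv => (kv.1.toList.dropLast, kv.2)) := by
    rw [hfold]
    have := PySem.Dict.items_foldl_insert_fresh l (fun kv => kv.1.toList.dropLast)
      (fun kv => kv.2) PySem.Dict.empty (by simp) hmapnd
    simpa using this
  have hstemsnd : (wdStems d).keys.Nodup := by
    have : (wdStems d).keys = l.map (fun kv => kv.1.toList.dropLast) := by
      simp [PySem.Dict.keys, hitems, List.map_map, Function.comp_def]
    rw [this]; exact hmapnd
  cases hres : d.get? (String.ofList (s ++ ['*'])) with
  | some v =>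
      have hmem : (String.ofList (s ++ ['*']), v) ∈ d.items :=
        (PySem.Dict.get?_eq_some_iff_mem_items d _ v hnd).mp hres
      have hinl : (String.ofList (s ++ ['*']), v) ∈ l := by
        refine List.mem_filter.mpr ⟨hmem, ?_⟩
        simp [PySem.Str.endswith_eq, PySem.Chars.endswith_iff]
      have : (s, v) ∈ (wdStems d).items := by
        rw [hitems]
        refine List.mem_map.mpr ⟨(String.ofList (s ++ ['*']), v), hinl, ?_⟩
        simp
      exact PySem.Dict.get?_of_mem_items _ this hstemsnd
  | none =>
      rw [PySem.Dict.get?_eq_none_iff_not_mem_keys] at hres ⊢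
      intro hs
      apply hres
      have : s ∈ l.map (fun kv => kv.1.toList.dropLast) := by
        have hk : (wdStems d).keys = l.map (fun kv => kv.1.toList.dropLast) := by
          simp [PySem.Dict.keys, hitems, List.map_map, Function.comp_def]
        rwa [hk] at hs
      rcases List.mem_map.mp this with ⟨kv, hkv, hdrop⟩
      have hkeq : kv.1 = String.ofList (s ++ ['*']) := by
        apply String.toList_injective
        rw [hstar kv hkv, hdrop]
        simp
      rw [← hkeq]
      exact List.mem_map.mpr ⟨kv, List.mem_of_mem_filter hkv, rfl⟩

-- A's descending first-match loop equals B's ascending last-match scan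
lemma wdScan_eq_wdWhile (d : PySem.Dict String Int) (st : PySem.Dict (List Char) Int)
    (hg : ∀ s : List Char, st.get? s = d.get? (String.ofList (s ++ ['*'])))
    (cs : List Char) : wdScan st cs = wdWhile d cs := by
  induction cs using List.reverseRecOn with
  | nil =>
      rw [wdWhile]
      simp [wdScan, PySem.List.pyRange]
  | append_singleton ds c ih =>
      have hne : ds ++ [c] ≠ [] := by simp
      have hrange : PySem.List.pyRange 1 (((ds ++ [c]).length : Int) + 1)
          = PySem.List.pyRange 1 ((ds.length : Int) + 1) ++ [((ds.length : Int) + 1)] := by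
        have hlen : ((ds ++ [c]).length : Int) = (ds.length : Int) + 1 := by simp
        rw [hlen]
        exact PySem.List.pyRange_one_succ_right (by omega)
      have htake : (ds ++ [c]).take ((ds.length : Int) + 1).toNat = ds ++ [c] := by
        have : ((ds.length : Int) + 1).toNat = ds.length + 1 := by omega
        simp [this]
      rw [wdWhile, dif_neg hne]
      simp only [wdScan, hrange, List.foldl_append, List.foldl_cons, List.foldl_nil]
      rw [htake, hg (ds ++ [c])]
      split
      · rfl
      · -- no match at full length: the earlier part of the scan is exactly wdScan on ds
        have hcongr :
            (PySem.List.pyRange 1 ((ds.length : Int) + 1)).foldl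
              (fun w i =>
                match st.get? ((ds ++ [c]).take i.toNat) with
                | some v => v
                | none => w) 0
            = (PySem.List.pyRange 1 ((ds.length : Int) + 1)).foldl
              (fun w i =>
                match st.get? (ds.take i.toNat) with
                | some v => v
                | none => w) 0 := by
          apply PySem.List.foldl_congr_mem
          intro acc i hi
          have hib := PySem.List.mem_pyRange_one.mp hi
          have : i.toNat ≤ ds.length := by omega
          rw [List.take_append_of_le_length this]
        rw [hcongr]
        have hdl : (ds ++ [c]).dropLast = ds := by simp
        rw [hdl]
        simpa only [wdScan] using ih

-- ===== VERDICT (by name: the statement is the Claim_ definition above) =====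
theorem weight_default_spec : Claim_equal_weight_default := by
  intro list_words dic_weights _hdom
  unfold Spec_weight_default weight_default weight_default_alt
  apply PySem.List.foldl_congr_mem
  intro acc word _hw
  cases h : (PySem.Dict.ofList dic_weights).get? word with
  | some v => simp
  | none =>
      rw [wdScan_eq_wdWhile (PySem.Dict.ofList dic_weights) (wdStems (PySem.Dict.ofList dic_weights))
        (fun s => wdStems_get? _ (PySem.Dict.nodup_keys_ofList dic_weights) s) word.toList]
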